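-- pv_equiv track=rewrite | github.com/chance-hwa/study | algorithm/find_distance_sum_for_aa.py | distance_sum_2
-- ===== SOURCE A (Python) =====
-- def distance_sum_2(protein, target):
--     # create a list to store the distance sum
--     total_length = len(protein)
--     distance_sums = [0] * total_length
--
--     # calculate the distance sum for each position using target indices
--     for i, aa in enumerate(protein):
--         if aa == target:
--             distance = [abs(i - j) for j in range(total_length)]
--             distance_sums = [sum(x) for x in zip(distance_sums, distance)]
--
--     return distance_sums
-- ===== SOURCE B (Python) =====
-- def distance_sum_2(protein, target):
--     # Two-pass prefix-sum sweep carrying a running count and running distance sum.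
--     def sweep(chars):
--         cnt = 0
--         dist = 0
--         out = []
--         for c in chars:
--             dist += cnt
--             if c == target:
--                 cnt += 1
--             out.append(dist)
--         return out
--     left = sweep(protein)
--     right = sweep(protein[::-1])
--     right.reverse()
--     return [l + r for l, r in zip(left, right)]
-- ===== Notes on version B (the rewrite author's own statement) =====
-- stated objective: alternative
-- what changed: Replaces the per-occurrence full |i-j| distance vector and repeated list zipping with two prefix-sum sweeps (left-to-right and right-to-left) that carry a running occurrence count and running distance sum, independent of the number of occurrences.
import Mathlib
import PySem

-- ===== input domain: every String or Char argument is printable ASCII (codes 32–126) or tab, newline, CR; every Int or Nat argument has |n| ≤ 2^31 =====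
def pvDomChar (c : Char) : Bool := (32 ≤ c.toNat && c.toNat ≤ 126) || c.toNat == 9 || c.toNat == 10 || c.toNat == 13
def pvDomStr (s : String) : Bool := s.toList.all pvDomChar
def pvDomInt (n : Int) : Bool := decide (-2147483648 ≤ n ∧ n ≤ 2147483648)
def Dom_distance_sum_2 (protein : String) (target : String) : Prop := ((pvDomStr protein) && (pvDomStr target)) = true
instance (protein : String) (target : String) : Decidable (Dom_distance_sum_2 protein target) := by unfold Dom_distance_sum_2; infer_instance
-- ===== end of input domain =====

-- B replaces A's per-occurrence distance vectors with two running-sum sweeps (objective: alternative).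

-- ===== PORT A =====
-- literal transliteration of A: start with [0]*n, for each matching position add the full |i-j| vector
def distance_sum_2 (protein : String) (target : String) : List Int :=
  (PySem.List.enumerate protein.toList 0).foldl
    (fun ds p =>
      if String.ofList [p.2] == target then
        (List.zip ds ((PySem.List.pyRange 0 (protein.toList.length : Int) 1).map (fun j => |p.1 - j|))).map
          (fun x => x.1 + x.2)
      else ds)
    (List.replicate protein.toList.length 0)

-- ===== PORT B =====
-- one sweep: running count of matches seen and running sum of distances to them (Source B's `sweep`)
def pvSweep (target : String) (chars : List Char) : List Int :=
  (chars.foldl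
    (fun (st : Int × Int × List Int) c =>
      let dist := st.2.1 + st.1
      let cnt := if String.ofList [c] == target then st.1 + 1 else st.1
      (cnt, dist, dist :: st.2.2))
    ((0 : Int), (0 : Int), ([] : List Int))).2.2.reverse

def distance_sum_2_alt (protein : String) (target : String) : List Int :=
  (List.zip (pvSweep target protein.toList) ((pvSweep target protein.toList.reverse).reverse)).map
    (fun x => x.1 + x.2)

-- ===== PRECONDITION & SPEC =====
def Spec_distance_sum_2 (protein : String) (target : String) (out : List Int) : Prop := out = distance_sum_2_alt protein target
instance (protein : String) (target : String) (out : List Int) : Decidable (Spec_distance_sum_2 protein target out) := by unfold Spec_distance_sum_2; infer_instance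

-- ===== CLAIM (what is proved, stated in full; the proofs are below) =====
def Claim_equal_distance_sum_2 : Prop := ∀ (protein : String) (target : String), Dom_distance_sum_2 protein target → Spec_distance_sum_2 protein target (distance_sum_2 protein target)

-- ===== LEMMAS AND PROOFS =====

-- Σ over matching positions i of |i - j|
def pvSabs (t : String) : List Char → Int → Int
  | [], _ => 0
  | c :: cs, j => (if String.ofList [c] == t then |j| else 0) + pvSabs t cs (j - 1)

-- Σ over matching positions i of max (j - i) 0
def pvSL (t : String) : List Char → Int → Int
  | [], _ => 0
  | c :: cs, j => (if String.ofList [c] == t then max j 0 else 0) + pvSL t cs (j - 1)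

-- Σ over matching positions i of max (i - j) 0
def pvSR (t : String) : List Char → Int → Int
  | [], _ => 0
  | c :: cs, j => (if String.ofList [c] == t then max (-j) 0 else 0) + pvSR t cs (j - 1)

lemma pvSabs_eq_SL_add_SR (t : String) (cs : List Char) : ∀ j, pvSabs t cs j = pvSL t cs j + pvSR t cs j := by
  induction cs with
  | nil => intro j; simp [pvSabs, pvSL, pvSR]
  | cons c cs ih =>
    intro j
    simp only [pvSabs, pvSL, pvSR, ih]
    have h : |j| = max j 0 + max (-j) 0 := by
      by_cases h : 0 ≤ j
      · rw [abs_of_nonneg h]; omega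
      · rw [abs_of_neg (by omega)]; omega
    split_ifs <;> omega

lemma pvSL_nonpos (t : String) (cs : List Char) : ∀ j, j ≤ 0 → pvSL t cs j = 0 := by
  induction cs with
  | nil => intro j _; simp [pvSL]
  | cons c cs ih =>
    intro j hj
    simp only [pvSL, ih (j - 1) (by omega)]
    split_ifs <;> omega

lemma pvSL_append (t : String) (c : Char) (l : List Char) :
    ∀ j, pvSL t (l ++ [c]) j = pvSL t l j + (if String.ofList [c] == t then max (j - (l.length : Int)) 0 else 0) := by
  induction l with
  | nil => intro j; simp [pvSL]
  | cons d l ih =>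
    intro j
    simp only [List.cons_append, pvSL, ih (j - 1), List.length_cons]
    push_cast
    split_ifs <;> ring_nf

lemma pvSR_eq_SL_reverse (t : String) (cs : List Char) :
    ∀ j, pvSR t cs j = pvSL t cs.reverse ((cs.length : Int) - 1 - j) := by
  induction cs with
  | nil => intro j; simp [pvSR, pvSL]
  | cons c cs ih =>
    intro j
    simp only [pvSR, List.reverse_cons, List.length_cons, ih (j - 1),
      pvSL_append t c cs.reverse, List.length_reverse]
    push_cast
    split_ifs <;> ring_nf

-- recursive model of Source B's sweep loop
def pvSweepRec (t : String) (cnt dist : Int) : List Char → List Int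
  | [] => []
  | c :: cs =>
    (dist + cnt) :: pvSweepRec t (if String.ofList [c] == t then cnt + 1 else cnt) (dist + cnt) cs

lemma pvSweep_foldl_eq (t : String) (cs : List Char) :
    ∀ cnt dist acc,
      (cs.foldl
        (fun (st : Int × Int × List Int) c =>
          let dist := st.2.1 + st.1
          let cnt := if String.ofList [c] == t then st.1 + 1 else st.1
          (cnt, dist, dist :: st.2.2))
        (cnt, dist, acc)).2.2 = (pvSweepRec t cnt dist cs).reverse ++ acc := by
  induction cs with
  | nil => intro cnt dist acc; simp [pvSweepRec]
  | cons c cs ih =>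
    intro cnt dist acc
    simp only [List.foldl_cons, pvSweepRec, ih, List.reverse_cons, List.append_assoc,
      List.cons_append, List.nil_append]

lemma pvSweepRec_char (t : String) (cs : List Char) :
    ∀ cnt dist, pvSweepRec t cnt dist cs =
      (List.range cs.length).map (fun (j : Nat) => dist + cnt * ((j : Int) + 1) + pvSL t cs (j : Int)) := by
  induction cs with
  | nil => intro cnt dist; simp [pvSweepRec]
  | cons c cs ih =>
    intro cnt dist
    simp only [pvSweepRec, List.length_cons, List.range_succ_eq_map, List.map_cons,
      List.map_map, ih, List.cons.injEq]
    refine ⟨?_, ?_⟩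
    · simp only [pvSL, Nat.cast_zero]
      rw [pvSL_nonpos t cs (0 - 1) (by omega)]
      split_ifs <;> simp
    · apply List.map_congr_left
      intro j _
      simp only [Function.comp_apply, pvSL, Nat.succ_eq_add_one]
      have hj : ((j + 1 : Nat) : Int) - 1 = (j : Int) := by push_cast; ring
      rw [hj]
      push_cast
      split_ifs with h
      · rw [max_eq_left (by positivity)]; ring
      · ring

lemma pvSweep_char (t : String) (cs : List Char) :
    pvSweep t cs = (List.range cs.length).map (fun (j : Nat) => pvSL t cs (j : Int)) := by
  unfold pvSweep
  rw [pvSweep_foldl_eq t cs 0 0 [], List.append_nil, List.reverse_reverse, pvSweepRec_char]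
  apply List.map_congr_left
  intro j _
  ring

-- zip of two maps over the same list, summed pointwise
lemma pvZipMapSum {α : Type} (l : List α) (f g : α → Int) :
    (List.zip (l.map f) (l.map g)).map (fun x => x.1 + x.2) = l.map (fun x => f x + g x) := by
  induction l with
  | nil => simp
  | cons a l ih => simp [ih]

lemma pvReverseMapRange (n : Nat) (g : Nat → Int) :
    ((List.range n).map g).reverse = (List.range n).map (fun j => g (n - 1 - j)) := by
  apply List.ext_getElem
  · simp
  · intro i h1 h2
    simp only [List.getElem_reverse, List.getElem_map, List.getElem_range, List.length_map,
      List.length_range] at *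

-- invariant for A's foldl over enumerate
lemma pvFoldA (t : String) (n : Nat) (cs : List Char) :
    ∀ (k : Int) (f : Nat → Int),
      ((PySem.List.enumerate cs k).foldl
        (fun ds p =>
          if String.ofList [p.2] == t then
            (List.zip ds ((PySem.List.pyRange 0 (n : Int) 1).map (fun j => |p.1 - j|))).map
              (fun x => x.1 + x.2)
          else ds)
        ((List.range n).map f)) =
      (List.range n).map (fun (j : Nat) => f j + pvSabs t cs ((j : Int) - k)) := by
  induction cs with
  | nil => intro k f; simp [PySem.List.enumerate_nil, pvSabs]
  | cons c cs ih =>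
    intro k f
    rw [PySem.List.enumerate_cons, List.foldl_cons]
    by_cases hm : String.ofList [c] == t
    · have hrange : (PySem.List.pyRange 0 (n : Int) 1).map (fun j => |(k : Int) - j|) =
          (List.range n).map (fun (j : Nat) => |(k : Int) - (j : Int)|) := by
        rw [PySem.List.pyRange_one]
        simp
      simp only [hm, if_pos]
      rw [hrange, pvZipMapSum, ih (k + 1) (fun (j : Nat) => f j + |(k : Int) - (j : Int)|)]
      apply List.map_congr_left
      intro j _
      simp only [pvSabs, hm, if_pos]
      rw [abs_sub_comm]
      ring_nf
    · simp only [hm, Bool.false_eq_true, if_neg, not_false_iff]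
      rw [ih (k + 1) f]
      apply List.map_congr_left
      intro j _
      simp only [pvSabs, hm, Bool.false_eq_true, if_neg, not_false_iff]
      ring_nf

lemma pvA_char (protein target : String) :
    distance_sum_2 protein target =
      (List.range protein.toList.length).map (fun (j : Nat) => pvSabs target protein.toList (j : Int)) := by
  unfold distance_sum_2
  have hinit : (List.replicate protein.toList.length (0 : Int)) =
      (List.range protein.toList.length).map (fun _ => (0 : Int)) := by
    simp [List.map_const']
  rw [hinit, pvFoldA target protein.toList.length protein.toList 0 (fun _ => 0)]
  simp

lemma pvB_char (protein target : String) :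
    distance_sum_2_alt protein target =
      (List.range protein.toList.length).map
        (fun (j : Nat) => pvSL target protein.toList (j : Int) + pvSR target protein.toList (j : Int)) := by
  unfold distance_sum_2_alt
  rw [pvSweep_char, pvSweep_char, List.length_reverse, pvReverseMapRange, pvZipMapSum]
  apply List.map_congr_left
  intro j hj
  rw [List.mem_range] at hj
  congr 1
  rw [pvSR_eq_SL_reverse]
  congr 1
  omega

-- ===== VERDICT (by name: the statement is the Claim_ definition above) =====
theorem distance_sum_2_spec : Claim_equal_distance_sum_2 := by
  intro protein target _
  unfold Spec_distance_sum_2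
  rw [pvA_char, pvB_char]
  apply List.map_congr_left
  intro j _
  exact pvSabs_eq_SL_add_SR target protein.toList (j : Int)
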